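-- pv_equiv track=rewrite | github.com/sligter/LambChat | src/infra/tool/add_skill_tool.py | _parse_skill_metadata
-- ===== SOURCE A (Python) =====
-- def _parse_skill_metadata(content: str) -> tuple[str, str]:
--     """
--     从 SKILL.md 内容解析 skill 名称和描述。
--
--     查找第一个标题作为名称，标题后的第一段作为描述。
--
--     Args:
--         content: SKILL.md 文件内容
--
--     Returns:
--         (name, description) 元组
--     """
--     lines = content.split("\n")
--     name = ""
--     description = ""
--     desc_lines = []
--     found_title = False
--     in_frontmatter = False
--
--     for line in lines:
--         # 检测 frontmatter
--         if line.strip() == "---":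
--             in_frontmatter = not in_frontmatter
--             continue
--         # 跳过 frontmatter 内容
--         if in_frontmatter:
--             continue
--         # 查找第一个标题
--         if line.startswith("# ") and not found_title:
--             name = line[2:].strip()
--             found_title = True
--             continue
--         # 收集描述（标题后的非空行，直到下一个标题或代码块）
--         if found_title:
--             if line.startswith("#") or line.startswith("```"):
--                 break
--             if line.strip():
--                 desc_lines.append(line.strip())
--
--     description = " ".join(desc_lines)[:200]  # 限制描述长度
--
--     return name, description
-- ===== SOURCE B (Python) =====
-- def _parse_skill_metadata(content: str) -> tuple[str, str]:
--     """Two-pass re-implementation: strip frontmatter first, then locate the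
--     title and collect the description paragraph."""
--     # Pass 1: drop frontmatter lines ('---' delimiters toggle, inner lines dropped).
--     active = []
--     in_frontmatter = False
--     for line in content.split("\n"):
--         if line.strip() == "---":
--             in_frontmatter = not in_frontmatter
--         elif not in_frontmatter:
--             active.append(line)
--
--     # Pass 2: first '# ' line gives the name.
--     title_idx = None
--     for i, line in enumerate(active):
--         if line.startswith("# "):
--             title_idx = i
--             break
--     if title_idx is None:
--         return "", ""
--     name = active[title_idx][2:].strip()
--
--     # Pass 3: collect stripped non-empty lines after the title, stop at a
--     # heading or code fence.
--     desc_lines = []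
--     for line in active[title_idx + 1:]:
--         if line.startswith("#") or line.startswith("```"):
--             break
--         if line.strip():
--             desc_lines.append(line.strip())
--     return name, " ".join(desc_lines)[:200]
-- ===== Notes on version B (the rewrite author's own statement) =====
-- stated objective: simpler
-- what changed: Replaces A's single loop over four pieces of mutable state (found-title and in-frontmatter flags, name, description accumulator) by three small independent passes: strip frontmatter lines, locate the first title line, then collect the description until a heading or code fence.
import Mathlib
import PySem

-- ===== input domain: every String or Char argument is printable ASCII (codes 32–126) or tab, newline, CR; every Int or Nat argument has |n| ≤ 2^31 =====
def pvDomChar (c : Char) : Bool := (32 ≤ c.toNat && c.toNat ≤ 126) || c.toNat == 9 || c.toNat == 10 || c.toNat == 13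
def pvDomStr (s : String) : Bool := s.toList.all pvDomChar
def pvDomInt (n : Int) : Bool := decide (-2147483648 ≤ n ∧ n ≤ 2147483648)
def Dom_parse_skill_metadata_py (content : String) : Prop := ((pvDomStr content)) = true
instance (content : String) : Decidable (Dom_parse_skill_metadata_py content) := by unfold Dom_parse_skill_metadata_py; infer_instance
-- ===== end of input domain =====

-- B re-decomposes A's single flag-driven loop into three passes (strip frontmatter,
-- find title, collect description); objective: simpler. Equivalence proved on all inputs.

-- ===== PORT A =====
-- A's single for-loop with state (name, desc_lines, found_title, in_frontmatter);
-- returning directly models Python's `break`.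
def pvLoopA : List String → Bool → Bool → String → List String → String × List String
  | [], _, _, name, desc => (name, desc)
  | l :: ls, found, inFM, name, desc =>
    if PySem.Str.strip l == "---" then pvLoopA ls found (!inFM) name desc
    else if inFM then pvLoopA ls found inFM name desc
    else if PySem.Str.startswith l "# " && !found then
      pvLoopA ls true inFM (PySem.Str.strip (PySem.Str.slice l (some 2) none)) desc
    else if found then
      if PySem.Str.startswith l "#" || PySem.Str.startswith l "```" then (name, desc)
      else if PySem.Str.strip l ≠ "" then pvLoopA ls found inFM name (desc ++ [PySem.Str.strip l])
      else pvLoopA ls found inFM name desc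
    else pvLoopA ls found inFM name desc

def parse_skill_metadata_py (content : String) : String × String :=
  let lines := (PySem.Str.split? content "\n").getD []
  let r := pvLoopA lines false false "" []
  (r.1, PySem.Str.slice (PySem.Str.join " " r.2) none (some 200))

-- ===== PORT B =====
-- pass 1: drop frontmatter ('---' toggles; inner lines dropped)
def pvStripFM : List String → Bool → List String
  | [], _ => []
  | l :: ls, inFM =>
    if PySem.Str.strip l == "---" then pvStripFM ls (!inFM)
    else if inFM then pvStripFM ls inFM
    else l :: pvStripFM ls inFM

-- pass 2: first line starting with '# ' gives (name, remaining lines)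
def pvFindTitle : List String → Option (String × List String)
  | [] => none
  | l :: ls =>
    if PySem.Str.startswith l "# " then
      some (PySem.Str.strip (PySem.Str.slice l (some 2) none), ls)
    else pvFindTitle ls

-- pass 3: stripped non-empty lines until a heading or code fence
def pvCollect : List String → List String
  | [] => []
  | l :: ls =>
    if PySem.Str.startswith l "#" || PySem.Str.startswith l "```" then []
    else if PySem.Str.strip l ≠ "" then PySem.Str.strip l :: pvCollect ls
    else pvCollect ls

def parse_skill_metadata_py_alt (content : String) : String × String :=
  let active := pvStripFM ((PySem.Str.split? content "\n").getD []) false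
  match pvFindTitle active with
  | none => ("", "")
  | some (name, rest) =>
    (name, PySem.Str.slice (PySem.Str.join " " (pvCollect rest)) none (some 200))

-- ===== PRECONDITION & SPEC =====
def Spec_parse_skill_metadata_py (content : String) (out : String × String) : Prop := out = parse_skill_metadata_py_alt content
instance (content : String) (out : String × String) : Decidable (Spec_parse_skill_metadata_py content out) := by unfold Spec_parse_skill_metadata_py; infer_instance

-- ===== CLAIM (what is proved, stated in full; the proofs are below) =====
def Claim_equal_parse_skill_metadata_py : Prop := ∀ (content : String), Dom_parse_skill_metadata_py content → Spec_parse_skill_metadata_py content (parse_skill_metadata_py content)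

-- ===== LEMMAS AND PROOFS =====

-- pvStripFM never outputs a line whose strip is "---"
theorem pvStripFM_noFM (ls : List String) (b : Bool) :
    ∀ l ∈ pvStripFM ls b, (PySem.Str.strip l == "---") = false := by
  induction ls generalizing b with
  | nil => simp [pvStripFM]
  | cons l ls ih =>
    intro x hx
    simp only [pvStripFM] at hx
    split_ifs at hx with h1 h2
    · exact ih _ x hx
    · exact ih _ x hx
    · rcases List.mem_cons.mp hx with rfl | hx
      · simpa using h1
      · exact ih _ x hx

-- found = true phase of A's loop on frontmatter-free lines: appends exactly pvCollect.
theorem pvLoopA_found (active : List String)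
    (hfm : ∀ l ∈ active, (PySem.Str.strip l == "---") = false)
    (name : String) (desc : List String) :
    pvLoopA active true false name desc = (name, desc ++ pvCollect active) := by
  induction active generalizing desc with
  | nil => simp [pvLoopA, pvCollect]
  | cons l ls ih =>
    have h1 := hfm l (by simp)
    have hrest : ∀ x ∈ ls, (PySem.Str.strip x == "---") = false := fun x hx => hfm x (by simp [hx])
    simp only [pvLoopA, pvCollect]
    split_ifs with c1 c2 c3 c4 <;> simp_all [ih hrest]

-- A's loop equals A's loop on the frontmatter-stripped lines.
theorem pvLoopA_stripFM (ls : List String) (found inFM : Bool) (name : String) (desc : List String) :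
    pvLoopA ls found inFM name desc = pvLoopA (pvStripFM ls inFM) found false name desc := by
  induction ls generalizing found inFM name desc with
  | nil => simp [pvLoopA, pvStripFM]
  | cons l ls ih =>
    by_cases c1 : (PySem.Str.strip l == "---") = true
    · rw [pvLoopA, pvStripFM, if_pos c1, if_pos c1]
      exact ih found (!inFM) name desc
    · rcases Bool.eq_false_or_eq_true inFM with hb | hb <;> subst hb
      · rw [pvLoopA, pvStripFM, if_neg c1, if_neg c1, if_pos rfl, if_pos rfl]
        exact ih found true name desc
      · rw [pvLoopA, pvStripFM, if_neg c1, if_neg c1,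
            if_neg (Bool.false_ne_true), if_neg (Bool.false_ne_true)]
        conv_rhs => rw [pvLoopA, if_neg c1, if_neg (Bool.false_ne_true)]
        split_ifs <;> first | rfl | exact ih _ _ _ _

-- found = false phase: A's loop is find-title-then-collect.
theorem pvLoopA_notfound (active : List String)
    (hfm : ∀ l ∈ active, (PySem.Str.strip l == "---") = false) :
    pvLoopA active false false "" [] =
      match pvFindTitle active with
      | none => ("", [])
      | some (name, rest) => (name, pvCollect rest) := by
  induction active with
  | nil => simp [pvLoopA, pvFindTitle]
  | cons l ls ih =>
    have h1 := hfm l (by simp)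
    have hrest : ∀ x ∈ ls, (PySem.Str.strip x == "---") = false := fun x hx => hfm x (by simp [hx])
    simp only [pvLoopA, pvFindTitle]
    split_ifs with c1 c2 <;> simp_all [pvLoopA_found ls hrest]

-- ===== VERDICT (by name: the statement is the Claim_ definition above) =====
theorem parse_skill_metadata_py_spec : Claim_equal_parse_skill_metadata_py := by
  intro content _
  unfold Spec_parse_skill_metadata_py
  simp only [parse_skill_metadata_py, parse_skill_metadata_py_alt]
  rw [pvLoopA_stripFM, pvLoopA_notfound _ (pvStripFM_noFM _ _)]
  cases htitle : pvFindTitle (pvStripFM ((PySem.Str.split? content "\n").getD []) false) with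
  | none => decide
  | some p => obtain ⟨n, rest⟩ := p; simp
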